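-- pv_equiv track=rewrite | github.com/GrantWasserstrom/Sudoku_Improved | Knight's Tour.py | most_constrained
-- ===== SOURCE A (Python) =====
-- ROW_COUNT = 8
--
-- COLUMN_COUNT = 8
--
-- def valid_move(x, y, board):
--     if 0 <= x < ROW_COUNT and 0 <= y < COLUMN_COUNT and board[x][y] == 0:
--         return True
--     return False
--
-- def most_constrained(eff_board, x_pos, y_pos, tour_board):
--     cons_options = []
--     for m in moves:
--         if valid_move(x_pos + m[0], y_pos + m[1], tour_board):
--             cons_options.append(eff_board[x_pos + m[0]][y_pos + m[1]])
--     cons_options.sort()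
--     for cm in moves:
--         if valid_move(x_pos + cm[0], y_pos + cm[1], tour_board) and \
--                 eff_board[x_pos + cm[0]][y_pos + cm[1]] == cons_options[0]:
--             return cm
--
-- moves = [[1, 2], [2, 1], [1, -2], [2, -1], [-1, 2], [-1, -2], [-2, 1], [-2, -1]]
-- ===== SOURCE B (Python) =====
-- ROW_COUNT = 8
--
-- COLUMN_COUNT = 8
--
-- moves = [[1, 2], [2, 1], [1, -2], [2, -1], [-1, 2], [-1, -2], [-2, 1], [-2, -1]]
--
-- def most_constrained(eff_board, x_pos, y_pos, tour_board):
--     # Single pass: keep the first valid move with the strictly smallest eff value.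
--     # If no move is valid, best stays None and we return None (A also returns None
--     # there: its second loop's `and` short-circuits, so cons_options[0] is never read).
--     best = None  # (value, move) or None
--     for m in moves:
--         x, y = x_pos + m[0], y_pos + m[1]
--         if 0 <= x < ROW_COUNT and 0 <= y < COLUMN_COUNT and tour_board[x][y] == 0:
--             v = eff_board[x][y]
--             if best is None or v < best[0]:
--                 best = (v, m)
--     return None if best is None else best[1]
-- ===== Notes on version B (the rewrite author's own statement) =====
-- stated objective: simpler
-- what changed: Replaces A's collect-all-values/sort/second-rescan-for-the-minimum with one pass over the 8 moves keeping the first valid move of strictly smallest eff value (strict < reproduces A's first-minimal tie-break); when no move is valid both return None (A's second loop short-circuits and falls through).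
import Mathlib
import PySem

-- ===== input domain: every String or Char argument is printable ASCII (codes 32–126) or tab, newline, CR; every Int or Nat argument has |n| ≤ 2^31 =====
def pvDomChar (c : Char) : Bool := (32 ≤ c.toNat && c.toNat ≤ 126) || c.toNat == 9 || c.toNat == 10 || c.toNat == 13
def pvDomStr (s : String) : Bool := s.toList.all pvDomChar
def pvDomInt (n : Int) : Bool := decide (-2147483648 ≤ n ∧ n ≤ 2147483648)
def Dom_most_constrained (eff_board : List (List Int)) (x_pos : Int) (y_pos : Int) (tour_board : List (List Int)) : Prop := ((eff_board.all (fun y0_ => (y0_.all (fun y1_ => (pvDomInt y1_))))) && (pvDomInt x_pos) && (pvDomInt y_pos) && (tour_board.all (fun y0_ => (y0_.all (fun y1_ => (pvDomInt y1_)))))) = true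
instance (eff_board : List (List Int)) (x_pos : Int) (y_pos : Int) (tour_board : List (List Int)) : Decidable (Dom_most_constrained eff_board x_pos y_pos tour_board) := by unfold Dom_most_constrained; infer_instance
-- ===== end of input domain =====

-- B replaces A's collect/sort/rescan over the 8 knight moves by a single pass keeping the
-- first valid move of strictly smallest eff value (objective: simpler).

-- ===== PORT A =====
def pvRowCount : Int := 8
def pvColumnCount : Int := 8
def pvMoves : List (List Int) := [[1, 2], [2, 1], [1, -2], [2, -1], [-1, 2], [-1, -2], [-2, 1], [-2, -1]]

-- board[x][y]; the defaults are only reached where Python raises IndexError (excluded by Pre_)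
def effAt (board : List (List Int)) (x y : Int) : Int :=
  PySem.List.pyGetD (PySem.List.pyGetD board x []) y 0

def valid_move (x y : Int) (board : List (List Int)) : Bool :=
  if 0 ≤ x ∧ x < pvRowCount ∧ 0 ≤ y ∧ y < pvColumnCount ∧
      PySem.List.pyGetD (PySem.List.pyGetD board x []) y 1 = 0 then true else false

def most_constrained (eff_board : List (List Int)) (x_pos : Int) (y_pos : Int) (tour_board : List (List Int)) : Option (List Int) :=
  let cons_options := pvMoves.foldl (fun acc m =>
    if valid_move (x_pos + PySem.List.pyGetD m 0 0) (y_pos + PySem.List.pyGetD m 1 0) tour_board then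
      acc ++ [effAt eff_board (x_pos + PySem.List.pyGetD m 0 0) (y_pos + PySem.List.pyGetD m 1 0)]
    else acc) []
  let sortedOpts := PySem.List.sorted cons_options (fun v => v) false
  -- Python's second loop: `cons_options[0]` sits after a short-circuiting `and`,
  -- so it is never evaluated when valid_move is false; with no valid move the loop
  -- falls through and A returns None (no IndexError on the empty cons_options).
  pvMoves.find? (fun cm =>
    valid_move (x_pos + PySem.List.pyGetD cm 0 0) (y_pos + PySem.List.pyGetD cm 1 0) tour_board &&
    (effAt eff_board (x_pos + PySem.List.pyGetD cm 0 0) (y_pos + PySem.List.pyGetD cm 1 0)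
      == PySem.List.pyGetD sortedOpts 0 0))

-- ===== PORT B =====
-- loop body of Source B: update best = (value, move) when the target is valid and strictly smaller
def mcStep (eff_board tour_board : List (List Int)) (x_pos y_pos : Int)
    (best : Option (Int × List Int)) (m : List Int) : Option (Int × List Int) :=
  let x := x_pos + PySem.List.pyGetD m 0 0
  let y := y_pos + PySem.List.pyGetD m 1 0
  if 0 ≤ x ∧ x < pvRowCount ∧ 0 ≤ y ∧ y < pvColumnCount ∧
      PySem.List.pyGetD (PySem.List.pyGetD tour_board x []) y 1 = 0 then
    let v := effAt eff_board x y
    match best with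
    | none => some (v, m)
    | some (bv, bm) => if v < bv then some (v, m) else some (bv, bm)
  else best

def most_constrained_alt (eff_board : List (List Int)) (x_pos : Int) (y_pos : Int) (tour_board : List (List Int)) : Option (List Int) :=
  match pvMoves.foldl (mcStep eff_board tour_board x_pos y_pos) none with
  | none => none
  | some (_, bm) => some bm

-- ===== PRECONDITION & SPEC =====
def pvOffsets : List (Int × Int) := [(1, 2), (2, 1), (1, -2), (2, -1), (-1, 2), (-1, -2), (-2, 1), (-2, -1)]

-- Pre_ excludes ONLY the inputs on which Python A raises IndexError from indexing a board
-- list that is too short: every knight target inside the 8×8 range must be indexable in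
-- tour_board, and in eff_board when the target cell is unvisited (0). The no-valid-move
-- case stays INSIDE Pre_: there A's second loop short-circuits before cons_options[0] and
-- both A and B return None, which the equivalence theorem covers.
def Pre_most_constrained (eff_board : List (List Int)) (x_pos : Int) (y_pos : Int) (tour_board : List (List Int)) : Prop :=
  ∀ d ∈ pvOffsets,
    (0 ≤ x_pos + d.1 ∧ x_pos + d.1 < 8 ∧ 0 ≤ y_pos + d.2 ∧ y_pos + d.2 < 8) →
      (PySem.Raise.InRange tour_board.length (x_pos + d.1) ∧
       PySem.Raise.InRange (PySem.List.pyGetD tour_board (x_pos + d.1) []).length (y_pos + d.2) ∧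
       (PySem.List.pyGetD (PySem.List.pyGetD tour_board (x_pos + d.1) []) (y_pos + d.2) 1 = 0 →
         PySem.Raise.InRange eff_board.length (x_pos + d.1) ∧
         PySem.Raise.InRange (PySem.List.pyGetD eff_board (x_pos + d.1) []).length (y_pos + d.2)))

instance (eff_board : List (List Int)) (x_pos : Int) (y_pos : Int) (tour_board : List (List Int)) : Decidable (Pre_most_constrained eff_board x_pos y_pos tour_board) := by unfold Pre_most_constrained; infer_instance

def pvWitness_most_constrained : List (List Int) × Int × Int × List (List Int) :=
  ([[3,4,2,3,3,4,2,3],[3,4,2,3,3,4,2,3],[3,4,2,3,3,4,2,3],[3,4,2,3,3,4,2,3],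
    [3,4,2,3,3,4,2,3],[3,4,2,3,3,4,2,3],[3,4,2,3,3,4,2,3],[3,4,2,3,3,4,2,3]],
   0, 0,
   [[0,0,0,0,0,0,0,0],[0,0,0,0,0,0,0,0],[0,0,0,0,0,0,0,0],[0,0,0,0,0,0,0,0],
    [0,0,0,0,0,0,0,0],[0,0,0,0,0,0,0,0],[0,0,0,0,0,0,0,0],[0,0,0,0,0,0,0,0]])

def Spec_most_constrained (eff_board : List (List Int)) (x_pos : Int) (y_pos : Int) (tour_board : List (List Int)) (out : Option (List Int)) : Prop := out = most_constrained_alt eff_board x_pos y_pos tour_board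
instance (eff_board : List (List Int)) (x_pos : Int) (y_pos : Int) (tour_board : List (List Int)) (out : Option (List Int)) : Decidable (Spec_most_constrained eff_board x_pos y_pos tour_board out) := by unfold Spec_most_constrained; infer_instance

-- ===== CLAIM (what is proved, stated in full; the proofs are below) =====
def Claim_equal_most_constrained : Prop := ∀ (eff_board : List (List Int)) (x_pos : Int) (y_pos : Int) (tour_board : List (List Int)), Dom_most_constrained eff_board x_pos y_pos tour_board → Pre_most_constrained eff_board x_pos y_pos tour_board → Spec_most_constrained eff_board x_pos y_pos tour_board (most_constrained eff_board x_pos y_pos tour_board)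

-- ===== LEMMAS AND PROOFS =====

-- proof-only helpers: "first minimal element" selector and the valid (value, move) pairs
def pvComb (p : Int × List Int) : Option (Int × List Int) → Option (Int × List Int)
  | none => some p
  | some q => if q.1 < p.1 then some q else some p

def pvFirstMin : List (Int × List Int) → Option (Int × List Int)
  | [] => none
  | p :: L => pvComb p (pvFirstMin L)

def pvPairs (ok : List Int → Bool) (val : List Int → Int) (ms : List (List Int)) : List (Int × List Int) :=
  ms.filterMap (fun m => if ok m then some (val m, m) else none)

def pvOk (t : List (List Int)) (xp yp : Int) (m : List Int) : Bool :=
  valid_move (xp + PySem.List.pyGetD m 0 0) (yp + PySem.List.pyGetD m 1 0) t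

def pvVal (e : List (List Int)) (xp yp : Int) (m : List Int) : Int :=
  effAt e (xp + PySem.List.pyGetD m 0 0) (yp + PySem.List.pyGetD m 1 0)

lemma pvComb_absorb (x y : Int × List Int) (s : Option (Int × List Int)) :
    pvComb x (pvComb y s) = pvComb (if y.1 < x.1 then y else x) s := by
  cases s with
  | none => simp only [pvComb]; split_ifs <;> simp_all
  | some q => simp only [pvComb]; split_ifs <;> simp_all <;> omega

lemma pvFirstMin_eq_none_iff (L : List (Int × List Int)) :
    pvFirstMin L = none ↔ L = [] := by
  cases L with
  | nil => simp [pvFirstMin]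
  | cons p t =>
    simp only [pvFirstMin]
    cases pvFirstMin t <;> simp [pvComb] <;> split_ifs <;> simp

lemma goEq (e t : List (List Int)) (xp yp : Int) :
    ∀ (ms : List (List Int)) (acc : Option (Int × List Int)),
      ms.foldl (mcStep e t xp yp) acc
        = pvFirstMin (acc.toList ++ pvPairs (pvOk t xp yp) (pvVal e xp yp) ms) := by
  intro ms
  induction ms with
  | nil =>
    intro acc; cases acc <;> simp [pvFirstMin, pvComb, pvPairs]
  | cons m rest ih =>
    intro acc
    have hstep : mcStep e t xp yp acc m =
        (if pvOk t xp yp m then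
          (match acc with
            | none => some (pvVal e xp yp m, m)
            | some (bv, bm) => if pvVal e xp yp m < bv then some (pvVal e xp yp m, m) else some (bv, bm))
          else acc) := by
      by_cases hc : (0 ≤ xp + PySem.List.pyGetD m 0 0 ∧ xp + PySem.List.pyGetD m 0 0 < pvRowCount ∧
          0 ≤ yp + PySem.List.pyGetD m 1 0 ∧ yp + PySem.List.pyGetD m 1 0 < pvColumnCount ∧
          PySem.List.pyGetD (PySem.List.pyGetD t (xp + PySem.List.pyGetD m 0 0) []) (yp + PySem.List.pyGetD m 1 0) 1 = 0)
      · simp [mcStep, pvOk, pvVal, valid_move, effAt, hc]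
      · simp [mcStep, pvOk, pvVal, valid_move, effAt, hc]
    have hpair : pvPairs (pvOk t xp yp) (pvVal e xp yp) (m :: rest) =
        (if pvOk t xp yp m then [(pvVal e xp yp m, m)] else [])
          ++ pvPairs (pvOk t xp yp) (pvVal e xp yp) rest := by
      simp only [pvPairs, List.filterMap_cons]
      split_ifs <;> simp
    rw [List.foldl_cons, ih, hstep, hpair]
    by_cases hok : pvOk t xp yp m
    · simp only [hok, if_pos]
      cases acc with
      | none => simp
      | some p =>
        obtain ⟨bv, bm⟩ := p
        simp only [Option.toList, List.cons_append, List.nil_append, pvFirstMin]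
        rw [pvComb_absorb]
        split_ifs <;> simp [pvFirstMin]
    · simp [hok]

lemma pvFirstMin_some (ok : List Int → Bool) (val : List Int → Int) :
    ∀ (ms : List (List Int)) (v : Int) (m : List Int),
      pvFirstMin (pvPairs ok val ms) = some (v, m) →
        ok m = true ∧ val m = v ∧ m ∈ ms ∧
        (∀ m' ∈ ms, ok m' = true → v ≤ val m') ∧
        ms.find? (fun cm => ok cm && (val cm == v)) = some m := by
  intro ms
  induction ms with
  | nil => intro v m h; simp [pvPairs, pvFirstMin] at h
  | cons m0 rest ih =>
    intro v m h
    by_cases hok : ok m0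
    · have hp : pvPairs ok val (m0 :: rest) = (val m0, m0) :: pvPairs ok val rest := by
        simp [pvPairs, List.filterMap_cons, hok]
      rw [hp] at h
      simp only [pvFirstMin] at h
      cases hP : pvFirstMin (pvPairs ok val rest) with
      | none =>
        rw [hP] at h
        simp only [pvComb, Option.some.injEq, Prod.mk.injEq] at h
        obtain ⟨hv, hm⟩ := h
        have hrest : pvPairs ok val rest = [] := (pvFirstMin_eq_none_iff _).mp hP
        have hnone : ∀ m' ∈ rest, ok m' = false := by
          intro m' hm'
          by_contra hcon
          have : (val m', m') ∈ pvPairs ok val rest := by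
            have hco : ok m' = true := by simpa using hcon
            simp only [pvPairs, List.mem_filterMap]
            exact ⟨m', hm', by rw [hco]; simp⟩
          rw [hrest] at this; simp at this
        subst hv hm
        refine ⟨hok, rfl, by simp, ?_, ?_⟩
        · intro m' hm' hok'
          rcases List.mem_cons.mp hm' with h' | h'
          · subst h'; exact le_refl _
          · exact absurd hok' (by simp [hnone m' h'])
        · simp [List.find?_cons, hok]
      | some q =>
        obtain ⟨v', m'⟩ := q
        rw [hP] at h
        obtain ⟨hok', hval', hmem', hle', hfind'⟩ := ih v' m' hP
        simp only [pvComb] at h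
        by_cases hlt : v' < val m0
        · rw [if_pos hlt] at h
          simp only [Option.some.injEq, Prod.mk.injEq] at h
          obtain ⟨hv, hm⟩ := h
          rw [← hv, ← hm]
          refine ⟨hok', hval', List.mem_cons_of_mem _ hmem', ?_, ?_⟩
          · intro m'' hm'' hok''
            rcases List.mem_cons.mp hm'' with h' | h'
            · subst h'; omega
            · exact hle' m'' h' hok''
          · have hne : (ok m0 && (val m0 == v')) = false := by
              rw [hok]; simp; omega
            simp only [List.find?_cons, hne, cond_false]
            exact hfind'
        · rw [if_neg hlt] at h
          simp only [Option.some.injEq, Prod.mk.injEq] at h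
          obtain ⟨hv, hm⟩ := h
          rw [← hv, ← hm]
          refine ⟨hok, rfl, by simp, ?_, ?_⟩
          · intro m'' hm'' hok''
            rcases List.mem_cons.mp hm'' with h' | h'
            · subst h'; exact le_refl _
            · have := hle' m'' h' hok''; omega
          · simp [List.find?_cons, hok]
    · have hp : pvPairs ok val (m0 :: rest) = pvPairs ok val rest := by
        simp [pvPairs, List.filterMap_cons, hok]
      rw [hp] at h
      obtain ⟨hok', hval', hmem', hle', hfind'⟩ := ih v m h
      refine ⟨hok', hval', List.mem_cons_of_mem _ hmem', ?_, ?_⟩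
      · intro m'' hm'' hok''
        rcases List.mem_cons.mp hm'' with h' | h'
        · subst h'; exact absurd hok'' (by simp [hok])
        · exact hle' m'' h' hok''
      · simp [List.find?_cons, Bool.eq_false_iff.mpr hok, hok]
        exact hfind'

lemma optsEq (ok : List Int → Bool) (val : List Int → Int) :
    ∀ (ms : List (List Int)) (acc : List Int),
      ms.foldl (fun a m => if ok m then a ++ [val m] else a) acc
        = acc ++ (pvPairs ok val ms).map Prod.fst := by
  intro ms
  induction ms with
  | nil => intro acc; simp [pvPairs]
  | cons m rest ih =>
    intro acc
    by_cases hok : ok m <;>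
      simp [List.foldl_cons, hok, ih, pvPairs, List.filterMap_cons]

theorem most_constrained_eq (e : List (List Int)) (xp yp : Int) (t : List (List Int)) :
    most_constrained e xp yp t = most_constrained_alt e xp yp t := by
  have hB : most_constrained_alt e xp yp t =
      (match pvFirstMin (pvPairs (pvOk t xp yp) (pvVal e xp yp) pvMoves) with
        | none => none
        | some (_, bm) => some bm) := by
    simp only [most_constrained_alt, goEq e t xp yp pvMoves none, Option.toList, List.nil_append]
  have hopts : pvMoves.foldl (fun acc m =>
      if valid_move (xp + PySem.List.pyGetD m 0 0) (yp + PySem.List.pyGetD m 1 0) t then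
        acc ++ [effAt e (xp + PySem.List.pyGetD m 0 0) (yp + PySem.List.pyGetD m 1 0)]
      else acc) []
      = (pvPairs (pvOk t xp yp) (pvVal e xp yp) pvMoves).map Prod.fst := by
    simpa [pvOk, pvVal] using optsEq (pvOk t xp yp) (pvVal e xp yp) pvMoves []
  cases hFM : pvFirstMin (pvPairs (pvOk t xp yp) (pvVal e xp yp) pvMoves) with
  | none =>
    have hnil : pvPairs (pvOk t xp yp) (pvVal e xp yp) pvMoves = [] :=
      (pvFirstMin_eq_none_iff _).mp hFM
    have hallfalse : ∀ m ∈ pvMoves, pvOk t xp yp m = false := by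
      intro m hm
      by_contra hcon
      have : (pvVal e xp yp m, m) ∈ pvPairs (pvOk t xp yp) (pvVal e xp yp) pvMoves := by
        have hco : pvOk t xp yp m = true := by simpa using hcon
        simp only [pvPairs, List.mem_filterMap]
        exact ⟨m, hm, by rw [hco]; simp⟩
      rw [hnil] at this; simp at this
    rw [hB, hFM]
    simp only [most_constrained]
    rw [hopts, hnil]
    apply List.find?_eq_none.mpr
    intro m hm
    simp [pvOk] at hallfalse
    simp [hallfalse m hm]
  | some q =>
    obtain ⟨v, m⟩ := q
    obtain ⟨hokm, hvalm, hmem, hle, hfind⟩ :=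
      pvFirstMin_some (pvOk t xp yp) (pvVal e xp yp) pvMoves v m hFM
    rw [hB, hFM]
    simp only [most_constrained]
    rw [hopts]
    -- the sorted list of values and its head
    set P := pvPairs (pvOk t xp yp) (pvVal e xp yp) pvMoves with hP
    have hvmem : v ∈ P.map Prod.fst := by
      refine List.mem_map.mpr ⟨(v, m), ?_, rfl⟩
      simp only [hP, pvPairs, List.mem_filterMap]
      exact ⟨m, hmem, by rw [hokm]; simp [hvalm]⟩
    have hperm : (PySem.List.sorted (P.map Prod.fst) (fun v => v) false).Perm (P.map Prod.fst) :=
      PySem.List.sorted_perm _ _ _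
    cases hs : PySem.List.sorted (P.map Prod.fst) (fun v => v) false with
    | nil =>
      exfalso
      rw [hs] at hperm
      have := hperm.symm.mem_iff.mp hvmem
      simp at this
    | cons h0 tl =>
      have hhead : PySem.List.pyGetD (h0 :: tl) 0 0 = h0 := by
        simp [PySem.List.pyGetD_zero_cons]
      have hpw : (h0 :: tl).Pairwise (fun a b => (fun v => v) a ≤ (fun v => v) b) := by
        rw [← hs]; exact PySem.List.sorted_pairwise _ _
      -- v ≤ h0
      have hh0mem : h0 ∈ P.map Prod.fst := by
        rw [hs] at hperm
        exact hperm.mem_iff.mp (by simp)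
      have hvle : ∀ w ∈ P.map Prod.fst, v ≤ w := by
        intro w hw
        obtain ⟨⟨w1, mw⟩, hpw', rfl⟩ := List.mem_map.mp hw
        simp only [hP, pvPairs, List.mem_filterMap] at hpw'
        obtain ⟨m', hm', hifm⟩ := hpw'
        by_cases hok' : pvOk t xp yp m'
        · rw [if_pos hok'] at hifm
          obtain ⟨h1, h2⟩ := Prod.mk.injEq .. ▸ (Option.some.injEq .. ▸ hifm)
          subst h1
          exact hle m' hm' hok'
        · rw [if_neg hok'] at hifm; simp at hifm
      have h1 : v ≤ h0 := hvle h0 hh0mem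
      have h2 : h0 ≤ v := by
        rw [hs] at hperm
        rcases List.mem_cons.mp (hperm.symm.mem_iff.mp hvmem) with h' | h'
        · omega
        · exact (List.pairwise_cons.mp hpw).1 v h'
      have hveq : h0 = v := le_antisymm h2 h1
      rw [hhead, hveq]
      simpa [pvOk, pvVal] using hfind

-- ===== VERDICT (by name: the statement is the Claim_ definition above) =====
theorem most_constrained_spec : Claim_equal_most_constrained := by
  intro e xp yp t _ _
  unfold Spec_most_constrained
  exact most_constrained_eq e xp yp t
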